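-- pv_equiv track=rewrite | github.com/TurboCoder13/py-lintro | lintro/utils/tool_utils.py | get_table_columns
-- ===== SOURCE A (Python) =====
-- def get_table_columns(
--     issues: list[dict[str, str]], tool_name: str, group_by: str | None = None
-- ) -> tuple[list[str], list[str]]:
--     """Get appropriate columns for displaying issues in a table.
--
--     Args:
--         issues: List of issues to analyze.
--         tool_name: Name of the tool that found the issues.
--         group_by: How to group the issues (file, code, or none).
--
--     Returns:
--         Tuple of (display_columns, data_columns).
--     """
--     if not issues:
--         return [], []
--
--     # Determine available columns from the first issue
--     available_columns = list(issues[0].keys())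
--
--     # Standard column order preferences
--     column_preferences = [
--         "file",
--         "line",
--         "column",
--         "code",
--         "message",
--         "severity",
--         "rule",
--     ]
--
--     # Order columns based on preferences
--     ordered_columns = []
--     for pref in column_preferences:
--         if pref in available_columns:
--             ordered_columns.append(pref)
--
--     # Add any remaining columns
--     for col in available_columns:
--         if col not in ordered_columns:
--             ordered_columns.append(col)
--
--     # Adjust based on grouping
--     if group_by == "file":
--         # When grouping by file, we might want to hide the file column in individual tables
--         display_columns = [col.title() for col in ordered_columns]
--         data_columns = ordered_columns
--     elif group_by == "code":
--         # When grouping by code, we might want to highlight the code column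
--         display_columns = [col.title() for col in ordered_columns]
--         data_columns = ordered_columns
--     else:
--         # No special grouping adjustments
--         display_columns = [col.title() for col in ordered_columns]
--         data_columns = ordered_columns
--
--     return display_columns, data_columns
-- ===== SOURCE B (Python) =====
-- def get_table_columns(issues, tool_name, group_by=None):
--     """Order table columns by preference for display (stable-sort re-implementation)."""
--     if not issues:
--         return [], []
--     column_preferences = [
--         "file",
--         "line",
--         "column",
--         "code",
--         "message",
--         "severity",
--         "rule",
--     ]
--     ordered = sorted(
--         issues[0].keys(),
--         key=lambda c: column_preferences.index(c)
--         if c in column_preferences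
--         else len(column_preferences),
--     )
--     return [col.title() for col in ordered], ordered
-- ===== Notes on version B (the rewrite author's own statement) =====
-- stated objective: simpler
-- what changed: Replaces A's two ordering loops (preference scan, then dedup-append scan) with one stable sort of the first issue's keys keyed by preference rank, and collapses the three identical group_by branches into one.
import Mathlib
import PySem

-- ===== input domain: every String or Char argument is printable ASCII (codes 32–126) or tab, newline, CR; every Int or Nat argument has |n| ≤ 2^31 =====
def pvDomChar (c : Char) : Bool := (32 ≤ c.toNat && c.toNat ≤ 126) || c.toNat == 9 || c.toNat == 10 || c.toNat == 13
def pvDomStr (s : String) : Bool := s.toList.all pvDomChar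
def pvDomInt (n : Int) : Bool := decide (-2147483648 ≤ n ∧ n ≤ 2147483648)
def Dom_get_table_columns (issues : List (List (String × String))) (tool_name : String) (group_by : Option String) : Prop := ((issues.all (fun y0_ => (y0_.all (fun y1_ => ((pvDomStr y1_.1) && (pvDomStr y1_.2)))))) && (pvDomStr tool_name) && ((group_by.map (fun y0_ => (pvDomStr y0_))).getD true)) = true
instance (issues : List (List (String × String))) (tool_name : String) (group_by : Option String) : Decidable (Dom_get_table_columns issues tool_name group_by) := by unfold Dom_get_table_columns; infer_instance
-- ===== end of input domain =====

-- B replaces A's two ordering loops by one stable sort keyed by preference rank (objective: simpler).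

-- shared helpers: the fixed preference list and a hand port of str.title(), exact on the ASCII domain
-- (a char is uppercased iff the previous char is not a letter, lowercased otherwise; both Pythons call .title())
def pvPrefs : List String := ["file", "line", "column", "code", "message", "severity", "rule"]

def pvTitleChars (cs : List Char) : List Char :=
  (cs.foldl (fun (st : List Char × Bool) c =>
    if c.isAlpha then (st.1 ++ [if st.2 then c.toLower else c.toUpper], true)
    else (st.1 ++ [c], false)) ([], false)).1

def pvTitle (s : String) : String := String.ofList (pvTitleChars s.toList)

-- ===== PORT A =====
def get_table_columns (issues : List (List (String × String))) (tool_name : String) (group_by : Option String) : List String × List String :=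
  match issues with
  | [] => ([], [])
  | issue0 :: _ =>
    -- available_columns = list(issues[0].keys())
    let available_columns := (PySem.Dict.ofList issue0).keys
    let column_preferences := pvPrefs
    -- first loop: preferences present in available_columns
    let ordered1 := column_preferences.foldl
      (fun acc pref => if pref ∈ available_columns then acc ++ [pref] else acc) []
    -- second loop: remaining columns, skipping those already placed
    let ordered_columns := available_columns.foldl
      (fun acc col => if col ∈ acc then acc else acc ++ [col]) ordered1
    -- three group_by branches (identical bodies in A, kept as branches)
    if group_by = some "file" then (ordered_columns.map pvTitle, ordered_columns)
    else if group_by = some "code" then (ordered_columns.map pvTitle, ordered_columns)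
    else (ordered_columns.map pvTitle, ordered_columns)

-- ===== PORT B =====
-- key: column_preferences.index(c) if c in column_preferences else len(column_preferences);
-- PySem.List.index? is some exactly on members, so .getD length is that expression verbatim
def pvRank (c : String) : Nat := (PySem.List.index? pvPrefs c).getD pvPrefs.length

def get_table_columns_alt (issues : List (List (String × String))) (tool_name : String) (group_by : Option String) : List String × List String :=
  match issues with
  | [] => ([], [])
  | issue0 :: _ =>
    let ordered := PySem.List.sorted (PySem.Dict.ofList issue0).keys pvRank false
    (ordered.map pvTitle, ordered)

-- ===== PRECONDITION & SPEC =====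
def Spec_get_table_columns (issues : List (List (String × String))) (tool_name : String) (group_by : Option String) (out : List String × List String) : Prop := out = get_table_columns_alt issues tool_name group_by
instance (issues : List (List (String × String))) (tool_name : String) (group_by : Option String) (out : List String × List String) : Decidable (Spec_get_table_columns issues tool_name group_by out) := by unfold Spec_get_table_columns; infer_instance

-- ===== CLAIM (what is proved, stated in full; the proofs are below) =====
def Claim_equal_get_table_columns : Prop := ∀ (issues : List (List (String × String))) (tool_name : String) (group_by : Option String), Dom_get_table_columns issues tool_name group_by → Spec_get_table_columns issues tool_name group_by (get_table_columns issues tool_name group_by)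

-- ===== LEMMAS AND PROOFS =====

-- inserting x into (as ++ x :: bs).filter m ++ tail lands exactly at x's preference slot
theorem pv_insertBy_filter_append (before : String → String → Bool) (x : String)
    (as bs tail : List String) (m : String → Bool)
    (hxa : x ∉ as) (hxb : x ∉ bs) (hmx : m x = false)
    (h1 : ∀ p ∈ as, before x p = false)
    (h2 : ∀ q ∈ bs, before x q = true)
    (h3 : ∀ t ∈ tail, before x t = true) :
    PySem.List.insertBy before x ((as ++ x :: bs).filter m ++ tail)
      = (as ++ x :: bs).filter (fun y => m y || (y == x)) ++ tail := by
  induction as with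
  | nil =>
    have hbs : bs.filter (fun y => m y || (y == x)) = bs.filter m := by
      apply List.filter_congr
      intro y hy
      have : (y == x) = false := by
        simp only [beq_eq_false_iff_ne]
        intro h; exact hxb (h ▸ hy)
      simp [this]
    simp only [List.nil_append, List.filter_cons, hmx, Bool.false_eq_true, if_false,
      Bool.false_or, beq_self_eq_true, if_true, hbs]
    -- goal: insertBy before x (bs.filter m ++ tail) = x :: (bs.filter m ++ tail)
    cases hys : bs.filter m ++ tail with
    | nil => simp [PySem.List.insertBy, hys]
    | cons y ys =>
      have hy : y ∈ bs.filter m ++ tail := by rw [hys]; exact List.mem_cons_self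
      have hbxy : before x y = true := by
        rcases List.mem_append.mp hy with h | h
        · exact h2 y (List.mem_of_mem_filter h)
        · exact h3 y h
      have hins : PySem.List.insertBy before x (y :: ys) = x :: y :: ys := by
        simp [PySem.List.insertBy, hbxy]
      rw [hins, ← hys, List.cons_append]
  | cons a as' ih =>
    have hax : before x a = false := h1 a List.mem_cons_self
    have hxa' : x ∉ as' := fun h => hxa (List.mem_cons_of_mem _ h)
    have hanex : (a == x) = false := by
      simp only [beq_eq_false_iff_ne]
      intro h; exact hxa (h ▸ List.mem_cons_self)
    have ih' := ih hxa' (fun p hp => h1 p (List.mem_cons_of_mem _ hp))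
    have hstep : ∀ rest, PySem.List.insertBy before x (a :: rest) = a :: PySem.List.insertBy before x rest := by
      intro rest
      simp [PySem.List.insertBy, hax]
    cases hma : m a with
    | true =>
      simp only [List.cons_append, List.filter_cons, hanex, Bool.or_false, hma, if_true]
      rw [hstep, ih']
    | false =>
      simp only [List.cons_append, List.filter_cons, hma, hanex, Bool.false_or]
      simpa using ih'

theorem pv_rank_le (c : String) : pvRank c ≤ pvPrefs.length := by
  unfold pvRank
  cases h : PySem.List.index? pvPrefs c with
  | none => simp
  | some k =>
    obtain ⟨hk, -, -⟩ := PySem.List.getElem_of_index?_eq_some h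
    simp [Nat.le_of_lt hk]

theorem pv_rank_not_mem {c : String} (hc : c ∉ pvPrefs) : pvRank c = pvPrefs.length := by
  unfold pvRank
  rw [(PySem.List.index?_eq_none_iff pvPrefs c).mpr hc]
  rfl

-- B's insertion sort builds "preferences present, then the rest in order"
theorem pv_sorted_fold (l : List String) (hnd : l.Nodup) :
    List.foldl (fun acc x => PySem.List.insertBy (fun a b => decide (pvRank a < pvRank b)) x acc) [] l
      = pvPrefs.filter (fun p => decide (p ∈ l)) ++ l.filter (fun c => !decide (c ∈ pvPrefs)) := by
  induction l using List.reverseRecOn with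
  | nil => simp
  | append_singleton l x ih =>
    have hnd' : l.Nodup := (List.nodup_append.mp hnd).1
    have hxl : x ∉ l := by
      intro h
      exact (List.nodup_append.mp hnd).2.2 x h x (by simp) rfl
    rw [List.foldl_append, List.foldl_cons, List.foldl_nil, ih hnd']
    by_cases hx : x ∈ pvPrefs
    · -- x is one of the seven preference names
      have hmx : (fun p => decide (p ∈ l)) x = false := by simp [hxl]
      have hfiltr : (l ++ [x]).filter (fun c => !decide (c ∈ pvPrefs))
          = l.filter (fun c => !decide (c ∈ pvPrefs)) := by
        simp [List.filter_append, hx]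
      have hprefs : ∀ (as bs : List String), pvPrefs = as ++ x :: bs → x ∉ as → x ∉ bs →
          (∀ p ∈ as, (fun a b => decide (pvRank a < pvRank b)) x p = false) →
          (∀ q ∈ bs, (fun a b => decide (pvRank a < pvRank b)) x q = true) →
          PySem.List.insertBy (fun a b => decide (pvRank a < pvRank b)) x
              (pvPrefs.filter (fun p => decide (p ∈ l)) ++ l.filter (fun c => !decide (c ∈ pvPrefs)))
            = pvPrefs.filter (fun p => decide (p ∈ l ++ [x])) ++ (l ++ [x]).filter (fun c => !decide (c ∈ pvPrefs)) := by
        intro as bs heq hxa hxb h1 h2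
        have h3 : ∀ t ∈ l.filter (fun c => !decide (c ∈ pvPrefs)),
            (fun a b => decide (pvRank a < pvRank b)) x t = true := by
          intro t ht
          have htp : t ∉ pvPrefs := by
            have := List.of_mem_filter ht
            simpa using this
          have hrx : pvRank x < pvPrefs.length := by
            cases hix : PySem.List.index? pvPrefs x with
            | none => exact absurd ((PySem.List.index?_eq_none_iff pvPrefs x).mp hix) (by exact fun h => h hx)
            | some k =>
              obtain ⟨hk, -, -⟩ := PySem.List.getElem_of_index?_eq_some hix
              unfold pvRank
              rw [hix]
              simpa using hk
          simp [pv_rank_not_mem htp, hrx]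
        have main := pv_insertBy_filter_append (fun a b => decide (pvRank a < pvRank b)) x as bs
          (l.filter (fun c => !decide (c ∈ pvPrefs))) (fun p => decide (p ∈ l)) hxa hxb hmx h1 h2 h3
        rw [← heq] at main
        rw [main, hfiltr]
        congr 1
        apply List.filter_congr
        intro y _
        by_cases hyl : y ∈ l <;> by_cases hyx : y = x <;> simp [hyl, hyx]
      -- split on which preference x is
      have hx7 : x = "file" ∨ x = "line" ∨ x = "column" ∨ x = "code" ∨ x = "message" ∨ x = "severity" ∨ x = "rule" := by
        simpa [pvPrefs] using hx
      rcases hx7 with rfl | rfl | rfl | rfl | rfl | rfl | rfl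
      · exact hprefs [] ["line","column","code","message","severity","rule"] rfl (by decide) (by decide) (by decide) (by decide)
      · exact hprefs ["file"] ["column","code","message","severity","rule"] rfl (by decide) (by decide) (by decide) (by decide)
      · exact hprefs ["file","line"] ["code","message","severity","rule"] rfl (by decide) (by decide) (by decide) (by decide)
      · exact hprefs ["file","line","column"] ["message","severity","rule"] rfl (by decide) (by decide) (by decide) (by decide)
      · exact hprefs ["file","line","column","code"] ["severity","rule"] rfl (by decide) (by decide) (by decide) (by decide)
      · exact hprefs ["file","line","column","code","message"] ["rule"] rfl (by decide) (by decide) (by decide) (by decide)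
      · exact hprefs ["file","line","column","code","message","severity"] [] rfl (by decide) (by decide) (by decide) (by decide)
    · -- x is not a preference: its rank is maximal, it goes to the end
      have hmax : ∀ y ∈ pvPrefs.filter (fun p => decide (p ∈ l)) ++ l.filter (fun c => !decide (c ∈ pvPrefs)),
          (fun a b => decide (pvRank a < pvRank b)) x y = false := by
        intro y _
        have := pv_rank_le y
        simp only [decide_eq_false_iff_not, Nat.not_lt, pv_rank_not_mem hx]
        exact this
      rw [PySem.List.insertBy_of_forall_not_before _ _ _ hmax]
      have h1 : pvPrefs.filter (fun p => decide (p ∈ l ++ [x])) = pvPrefs.filter (fun p => decide (p ∈ l)) := by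
        apply List.filter_congr
        intro p hp
        have : p ≠ x := fun h => hx (h ▸ hp)
        simp [List.mem_append, this]
      rw [h1, List.filter_append]
      simp [hx]

-- A's two loops build the same list
theorem pv_dedup_fold (l : List String) (acc : List String) (hnd : l.Nodup)
    (h : ∀ c ∈ l, (c ∈ acc ↔ c ∈ pvPrefs)) :
    l.foldl (fun acc col => if col ∈ acc then acc else acc ++ [col]) acc
      = acc ++ l.filter (fun c => !decide (c ∈ pvPrefs)) := by
  induction l generalizing acc with
  | nil => simp
  | cons c l' ih =>
    have hc := h c List.mem_cons_self
    have hnd' : l'.Nodup := (List.nodup_cons.mp hnd).2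
    have hcl' : c ∉ l' := (List.nodup_cons.mp hnd).1
    by_cases hcp : c ∈ pvPrefs
    · have hca : c ∈ acc := hc.mpr hcp
      rw [List.foldl_cons, if_pos hca, ih acc hnd' (fun d hd => h d (List.mem_cons_of_mem _ hd))]
      simp [hcp]
    · have hca : c ∉ acc := fun hin => hcp (hc.mp hin)
      rw [List.foldl_cons, if_neg hca]
      have h' : ∀ d ∈ l', (d ∈ acc ++ [c] ↔ d ∈ pvPrefs) := by
        intro d hd
        have hdc : d ≠ c := fun hdc => hcl' (hdc ▸ hd)
        rw [List.mem_append]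
        simp only [List.mem_singleton, hdc, or_false]
        exact h d (List.mem_cons_of_mem _ hd)
      rw [ih (acc ++ [c]) hnd' h']
      simp [hcp]

-- the heart: A's ordered_columns equals B's stable sort, for duplicate-free columns
theorem pv_ordered_eq (avail : List String) (hnd : avail.Nodup) :
    avail.foldl (fun acc col => if col ∈ acc then acc else acc ++ [col])
      (pvPrefs.foldl (fun acc pref => if pref ∈ avail then acc ++ [pref] else acc) [])
      = PySem.List.sorted avail pvRank false := by
  have h1 : pvPrefs.foldl (fun acc pref => if pref ∈ avail then acc ++ [pref] else acc) []
      = pvPrefs.filter (fun p => decide (p ∈ avail)) := by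
    have := PySem.List.foldl_append_if_eq_filter (fun p => decide (p ∈ avail)) pvPrefs []
    simpa using this
  rw [h1, PySem.List.sorted_eq_foldl_insertBy, pv_sorted_fold avail hnd]
  apply pv_dedup_fold avail _ hnd
  intro c hc
  simp [List.mem_filter, hc]

-- ===== VERDICT (by name: the statement is the Claim_ definition above) =====
theorem get_table_columns_spec : Claim_equal_get_table_columns := by
  intro issues tool_name group_by _
  unfold Spec_get_table_columns get_table_columns get_table_columns_alt
  cases issues with
  | nil => rfl
  | cons issue0 rest =>
    simp only
    rw [pv_ordered_eq _ (PySem.Dict.nodup_keys_ofList issue0)]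
    split_ifs <;> rfl
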